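-- pv_equiv track=rewrite | github.com/jed1337/Kattis | h_to_o.py | get_atom_dict
-- ===== SOURCE A (Python) =====
-- from collections import defaultdict
--
-- def get_atom_dict(m, q=1):
--     atom_dict = defaultdict(lambda: 0)
--     number_string = ""
--     current_atom = ""
--
--     for char in m:
--         if char.isnumeric():
--             number_string += char
--         else:
--             if current_atom:
--                 atom_dict[current_atom] += from_number_string(number_string) * q
--                 number_string = ""
--             current_atom = char
--
--     if current_atom:
--         atom_dict[current_atom] += from_number_string(number_string) * q
--
--     return atom_dict
--
-- def from_number_string(ns):
--     if ns:
--         return int(ns)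
--     else:
--         return 1
-- ===== SOURCE B (Python) =====
-- import re
-- from collections import defaultdict
--
--
-- def get_atom_dict(m, q=1):
--     # Tokenize first (one non-digit char, then its trailing digit run),
--     # then accumulate counts over the token list.
--     atom_dict = defaultdict(lambda: 0)
--     for atom, digits in re.findall(r'(\D)(\d*)', m):
--         atom_dict[atom] += (int(digits) if digits else 1) * q
--     return atom_dict
-- ===== Notes on version B (the rewrite author's own statement) =====
-- stated objective: idiomatic
-- what changed: Replaces the char-by-char mutable state machine (current_atom/number_string carried across iterations) with regex tokenization re.findall(r'(\D)(\d*)') followed by a plain accumulation loop over the token list.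
-- intended difference: On strings that start with a digit and contain a non-digit (and q != 0), A folds the stray leading digit run into the first atom's count because number_string is leftover loop state; B ignores digits that precede any atom and counts only the digits written after it, the intended reading where a count belongs to the atom before it. — e.g. on get_atom_dict("2H", 1): A returns [("H", 2)], B returns [("H", 1)]
import Mathlib
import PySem

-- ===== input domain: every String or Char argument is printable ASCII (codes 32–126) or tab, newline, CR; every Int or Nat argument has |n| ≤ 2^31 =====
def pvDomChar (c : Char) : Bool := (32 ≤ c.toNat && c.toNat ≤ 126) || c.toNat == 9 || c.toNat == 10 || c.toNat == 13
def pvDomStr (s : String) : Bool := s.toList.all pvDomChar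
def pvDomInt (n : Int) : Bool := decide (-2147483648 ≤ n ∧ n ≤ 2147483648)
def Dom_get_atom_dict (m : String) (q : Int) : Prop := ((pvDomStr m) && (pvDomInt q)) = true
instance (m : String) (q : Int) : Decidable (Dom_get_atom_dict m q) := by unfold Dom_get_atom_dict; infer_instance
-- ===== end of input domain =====

-- B replaces A's char-by-char mutable state machine by regex tokenization plus a
-- plain accumulation loop (idiomatic, same O(n) cost); on strings with a stray
-- leading digit run A folds those digits into the first atom's count (leftover
-- loop state), B ignores them — stated below as the intended difference D_.

-- ===== PORT A =====
-- from_number_string(ns): ns here is always a run of chars that passed isnumeric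
-- (ASCII digits on Dom), so int(ns) = PySem.Int.ofChars? ns is always `some`;
-- the `.getD 0` default is unreachable on Dom.
def pvFromNum (ns : List Char) : Int :=
  if ns = [] then 1 else (PySem.Int.ofChars? ns).getD 0

-- one iteration of A's for-loop over (atom_dict, number_string, current_atom);
-- char.isnumeric() = PySem.Chars.isdigit on the printable-ASCII domain.
def pvStepA (q : Int) (st : PySem.Dict String Int × List Char × List Char) (c : Char) :
    PySem.Dict String Int × List Char × List Char :=
  if PySem.Chars.isdigit c then (st.1, st.2.1 ++ [c], st.2.2)
  else if st.2.2 = [] then (st.1, st.2.1, [c])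
  else (st.1.insert (String.ofList st.2.2) (st.1.getD (String.ofList st.2.2) 0 + pvFromNum st.2.1 * q),
        [], [c])

-- A's trailing `if current_atom:` flush after the loop
def pvFinishA (q : Int) (st : PySem.Dict String Int × List Char × List Char) :
    PySem.Dict String Int :=
  if st.2.2 = [] then st.1
  else st.1.insert (String.ofList st.2.2) (st.1.getD (String.ofList st.2.2) 0 + pvFromNum st.2.1 * q)

def get_atom_dict (m : String) (q : Int) : List (String × Int) :=
  (pvFinishA q (m.toList.foldl (pvStepA q) (PySem.Dict.empty, [], []))).items

-- ===== PORT B =====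
-- re.findall(r'(\D)(\d*)', m): scan left to right, skip unmatched digit
-- positions, at a non-digit capture it with its greedy trailing digit run;
-- \d = PySem.Chars.isdigit on the printable-ASCII domain.
def pvTokens : List Char → List (Char × List Char)
  | [] => []
  | c :: cs =>
    if PySem.Chars.isdigit c then pvTokens cs
    else (c, cs.takeWhile PySem.Chars.isdigit) :: pvTokens cs

-- (int(digits) if digits else 1); int = PySem.Int.ofChars?, `some` on digit runs.
def pvVal (ds : List Char) : Int :=
  if ds = [] then 1 else (PySem.Int.ofChars? ds).getD 0

-- the body of B's for-loop: atom_dict[atom] += (int(digits) if digits else 1) * q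
def pvStepB (q : Int) (d : PySem.Dict String Int) (t : Char × List Char) :
    PySem.Dict String Int :=
  d.insert (String.ofList [t.1]) (d.getD (String.ofList [t.1]) 0 + pvVal t.2 * q)

def get_atom_dict_alt (m : String) (q : Int) : List (String × Int) :=
  ((pvTokens m.toList).foldl (pvStepB q) PySem.Dict.empty).items

-- ===== PRECONDITION & SPEC =====
-- On strings that start with a digit and contain a non-digit (and q ≠ 0), A folds the
-- stray leading digit run into the first atom's count because number_string is leftover
-- loop state; B ignores digits that precede any atom and counts only the digits written
-- after it, the intended reading where a count belongs to the atom before it.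
def D_get_atom_dict (m : String) (q : Int) : Prop :=
  PySem.Chars.isdigit (m.toList.headD 'a') = true ∧
  m.toList.any (fun c => !PySem.Chars.isdigit c) = true ∧ q ≠ 0
instance (m : String) (q : Int) : Decidable (D_get_atom_dict m q) := by
  unfold D_get_atom_dict; infer_instance

def Spec_get_atom_dict (m : String) (q : Int) (out : List (String × Int)) : Prop :=
  ¬ D_get_atom_dict m q → out = get_atom_dict_alt m q
instance (m : String) (q : Int) (out : List (String × Int)) : Decidable (Spec_get_atom_dict m q out) := by
  unfold Spec_get_atom_dict; infer_instance

def pvDiffWitness_get_atom_dict : String × Int := ("2H", 1)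
def pvDiffWitnessOut_get_atom_dict : (List (String × Int)) × (List (String × Int)) :=
  ([("H", 2)], [("H", 1)])

-- ===== CLAIM (what is proved, stated in full; the proofs are below) =====
def Claim_unchanged_get_atom_dict : Prop :=
  ∀ (m : String) (q : Int), Dom_get_atom_dict m q → Spec_get_atom_dict m q (get_atom_dict m q)
def Claim_changed_get_atom_dict : Prop :=
  Dom_get_atom_dict (pvDiffWitness_get_atom_dict.1) (pvDiffWitness_get_atom_dict.2) ∧
  D_get_atom_dict (pvDiffWitness_get_atom_dict.1) (pvDiffWitness_get_atom_dict.2) ∧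
  get_atom_dict (pvDiffWitness_get_atom_dict.1) (pvDiffWitness_get_atom_dict.2) = pvDiffWitnessOut_get_atom_dict.1 ∧
  get_atom_dict_alt (pvDiffWitness_get_atom_dict.1) (pvDiffWitness_get_atom_dict.2) = pvDiffWitnessOut_get_atom_dict.2 ∧
  pvDiffWitnessOut_get_atom_dict.1 ≠ pvDiffWitnessOut_get_atom_dict.2

-- ===== LEMMAS AND PROOFS =====

theorem pvFromNum_eq_pvVal (ds : List Char) : pvFromNum ds = pvVal ds := rfl

-- a run of digits only accumulates into number_string
theorem pvFoldA_digits (q : Int) (ds : List Char) (h : ∀ c ∈ ds, PySem.Chars.isdigit c = true) :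
    ∀ d ns ca, ds.foldl (pvStepA q) (d, ns, ca) = (d, ns ++ ds, ca) := by
  induction ds with
  | nil => intro d ns ca; simp
  | cons c cs ih =>
    intro d ns ca
    have hc : PySem.Chars.isdigit c = true := h c (by simp)
    simp only [List.foldl_cons, pvStepA, hc, if_true]
    rw [ih (fun x hx => h x (by simp [hx])) d (ns ++ [c]) ca]
    simp

-- the regex scanner skips a leading run of digits
theorem pvTokens_digits (ds : List Char) (h : ∀ c ∈ ds, PySem.Chars.isdigit c = true) :
    ∀ r, pvTokens (ds ++ r) = pvTokens r := by
  induction ds with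
  | nil => intro r; simp
  | cons c cs ih =>
    intro r
    have hc : PySem.Chars.isdigit c = true := h c (by simp)
    simp only [List.cons_append, pvTokens, hc, if_true]
    exact ih (fun x hx => h x (by simp [hx])) r

-- the scanner emits nothing on a pure digit run
theorem pvTokens_all_digits (ds : List Char) (h : ∀ c ∈ ds, PySem.Chars.isdigit c = true) :
    pvTokens ds = [] := by
  have := pvTokens_digits ds h []
  simpa using this

-- main loop correspondence: once a current_atom `a` exists with pending digits ns,
-- A's remaining scan plus final flush equals B's fold over the remaining tokens,
-- starting from the dict to which a's (pending ++ following digits) count was added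
theorem pvLoop_eq (q : Int) :
    ∀ (cs : List Char) (d : PySem.Dict String Int) (a : Char) (ns : List Char),
      pvFinishA q (cs.foldl (pvStepA q) (d, ns, [a]))
        = (pvTokens cs).foldl (pvStepB q)
            (d.insert (String.ofList [a])
              (d.getD (String.ofList [a]) 0
                + pvFromNum (ns ++ cs.takeWhile PySem.Chars.isdigit) * q)) := by
  intro cs
  induction cs with
  | nil =>
    intro d a ns
    simp [pvFinishA, pvTokens]
  | cons x cs ih =>
    intro d a ns
    by_cases hx : PySem.Chars.isdigit x = true
    · simp only [List.foldl_cons, pvStepA, hx, if_true, pvTokens,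
        List.takeWhile_cons_of_pos hx]
      rw [ih]
      simp [List.append_assoc]
    · simp only [List.foldl_cons, pvStepA, hx, Bool.false_eq_true, reduceIte,
        List.takeWhile_cons_of_neg hx]
      simp only [if_neg (by simp : ¬ ([a] : List Char) = [])]
      rw [ih]
      simp only [pvTokens, hx, Bool.false_eq_true, reduceIte, List.foldl_cons]
      simp [pvStepB, pvFromNum, pvVal]

-- ===== VERDICT (by name: the statement is the Claim_ definition above) =====
theorem get_atom_dict_spec : Claim_unchanged_get_atom_dict := by
  intro m q hdom
  unfold Spec_get_atom_dict
  intro hnd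
  unfold get_atom_dict get_atom_dict_alt
  rcases hr : m.toList.dropWhile PySem.Chars.isdigit with _ | ⟨c, r'⟩
  · -- the whole string is digits (or empty): both sides are the empty dict
    have hall : ∀ x ∈ m.toList, PySem.Chars.isdigit x = true :=
      List.dropWhile_eq_nil_iff.mp hr
    rw [pvFoldA_digits q m.toList hall, pvTokens_all_digits m.toList hall]
    simp [pvFinishA]
  · -- m = digit-run ++ c :: r' with c the first non-digit
    have hcs : m.toList.takeWhile PySem.Chars.isdigit ++ c :: r' = m.toList := by
      rw [← hr]; exact List.takeWhile_append_dropWhile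
    have hc : PySem.Chars.isdigit c = false := by
      have h1 : m.toList.dropWhile PySem.Chars.isdigit ≠ [] := by simp [hr]
      have h2 := List.head_dropWhile_not PySem.Chars.isdigit h1
      revert h2 h1
      rw [hr]
      intro h1 h2
      simpa using h2
    have ht : ∀ x ∈ m.toList.takeWhile PySem.Chars.isdigit, PySem.Chars.isdigit x = true :=
      fun x hx => List.mem_takeWhile_imp hx
    -- the crucial value equality for the first atom, from ¬D_
    have hval : pvFromNum (m.toList.takeWhile PySem.Chars.isdigit
          ++ r'.takeWhile PySem.Chars.isdigit) * q
        = pvVal (r'.takeWhile PySem.Chars.isdigit) * q := by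
      by_cases hq : q = 0
      · simp [hq]
      · have hex : m.toList.any (fun x => !PySem.Chars.isdigit x) = true := by
          have hcm : c ∈ m.toList := by
            rw [← hcs]; simp
          exact List.any_eq_true.mpr ⟨c, hcm, by simp [hc]⟩
        have hhead : ¬ PySem.Chars.isdigit (m.toList.headD 'a') = true := by
          intro hh
          exact hnd ⟨hh, hex, hq⟩
        have hT : m.toList.takeWhile PySem.Chars.isdigit = [] := by
          rcases hm : m.toList with _ | ⟨y, ys⟩
          · simp
          · rw [hm] at hhead
            simp only [List.headD_cons] at hhead
            exact List.takeWhile_cons_of_neg hhead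
        rw [hT]
        simp [pvFromNum_eq_pvVal]
    -- fold A over m = (digit run) ++ c :: r'
    rw [← hcs, List.foldl_append, pvFoldA_digits q _ ht, List.foldl_cons]
    have hstep : pvStepA q (PySem.Dict.empty, [] ++ m.toList.takeWhile PySem.Chars.isdigit, []) c
        = (PySem.Dict.empty, m.toList.takeWhile PySem.Chars.isdigit, [c]) := by
      simp [pvStepA, hc]
    rw [hstep, pvLoop_eq, pvTokens_digits _ ht]
    simp only [pvTokens, hc, Bool.false_eq_true, reduceIte, List.foldl_cons]
    rw [hval]
    rfl

set_option maxRecDepth 4096 in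
theorem get_atom_dict_changed : Claim_changed_get_atom_dict := by
  unfold Claim_changed_get_atom_dict
  refine ⟨?_, ?_, ?_, ?_, ?_⟩
  · decide
  · decide
  · decide
  · decide
  · decide
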